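-- pv_equiv track=rewrite | github.com/Kevin200096/CMEECourseWork | week2/code/align_seqs_fasta.py | compare_seq_score
-- ===== SOURCE A (Python) =====
-- def calculate_score_and_alignment(s1, s2, l1, l2, startpoint):
--     """Calculate the alignment score and returns the alignment details"""
--     matched = ""  # To hold string displaying matches and mismatches
--     alignment_s1 = "." * startpoint + s2  # Align s2 starting at the given point
--     score = 0
--     for i in range(l2):
--         if (i + startpoint) < l1:
--             if s1[i + startpoint] == s2[i]:  # If the bases match
--                 matched += "*"
--                 score += 1
--             else:
--                 matched += "-"
--     return score, alignment_s1, matched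
--
-- def compare_seq_score(s1, s2, l1, l2):
--     """Find the best alignment and return its score and the alignment"""
--     best_align = None
--     best_score = -1
--     best_match = None
--     for i in range(l1):  # Iterate over all possible starting points
--         current_score, alignment_s1, matched = calculate_score_and_alignment(s1, s2, l1, l2, i)
--         if current_score > best_score:
--             best_align = alignment_s1
--             best_score = current_score
--             best_match = matched
--     return best_score, best_align, best_match
-- ===== SOURCE B (Python) =====
-- def compare_seq_score(s1, s2, l1, l2):
--     """Find the best alignment and return its score and the alignment.
--
--     Inverted-index algorithm: build a char -> positions index of s1's first l1
--     characters once, then for each character of s2's usable prefix bump a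
--     diagonal counter counts[p - j] only at actually matching (position,
--     character) pairs; no per-offset rescans.  Only j <= p < l1 pairs can ever
--     score, so only the first min(l2, l1) characters of s2 are looked at; with
--     no query characters (l2 <= 0) every count stays zero.  The best offset is
--     the first index holding the maximal count; its alignment and match string
--     are built once at the end.
--     """
--     counts = [0] * l1
--     if l2 > 0:
--         pos1 = {}
--         for p in range(l1):
--             pos1.setdefault(s1[p], []).append(p)
--         for j in range(min(l2, l1)):
--             for p in pos1.get(s2[j], ()):
--                 if p >= j:
--                     counts[p - j] += 1
--     best_score = max(counts)          # ValueError on l1 <= 0 (outside Pre_)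
--     best = counts.index(best_score)   # first offset achieving the maximum
--     matched = "".join("*" if a == b else "-"
--                       for a, b in zip(s1[best:l1], s2[:max(l2, 0)]))
--     return best_score, "." * best + s2, matched
-- ===== Notes on version B (the rewrite author's own statement) =====
-- stated objective: alternative
-- what changed: B replaces A's per-offset rescans with an inverted index: it builds a char->positions map of s1's prefix once, then for each character of s2's usable prefix bumps a diagonal counter counts[p-j] only at actually matching position/character pairs, takes the first index of the maximal count, and builds the alignment and match strings once for that winning offset.
-- outside the precondition, e.g. on compare_seq_score('ab', 'c', 0, 1): A returns (-1, None, None), B raises ValueError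
import Mathlib
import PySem

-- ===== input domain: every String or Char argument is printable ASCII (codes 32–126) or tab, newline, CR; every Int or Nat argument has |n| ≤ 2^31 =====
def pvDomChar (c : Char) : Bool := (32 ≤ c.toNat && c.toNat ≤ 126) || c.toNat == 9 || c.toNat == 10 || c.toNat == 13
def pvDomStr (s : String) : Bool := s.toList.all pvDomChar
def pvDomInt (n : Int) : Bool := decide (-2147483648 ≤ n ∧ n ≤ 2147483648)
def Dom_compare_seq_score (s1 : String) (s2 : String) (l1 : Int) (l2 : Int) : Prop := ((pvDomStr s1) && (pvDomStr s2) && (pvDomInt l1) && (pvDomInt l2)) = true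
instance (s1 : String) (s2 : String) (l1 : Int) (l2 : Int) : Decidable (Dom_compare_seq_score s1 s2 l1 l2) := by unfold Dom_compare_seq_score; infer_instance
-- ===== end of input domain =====

-- B replaces A's per-offset rescans by an inverted index (char -> positions of s1's
-- prefix) and a diagonal counter bumped only at matching position/character pairs;
-- the alignment and match strings are built once, for the winning offset.

-- ===== PORT A =====
-- '.' * n — Python's string repetition primitive, ported with doubling so that
-- evaluation is linear in the output (value: n dots)
def pvDots (n : Nat) : String :=
  if h : n = 0 then ""
  else
    let half := pvDots (n / 2)
    if n % 2 = 0 then half ++ half else (half ++ half).push '.'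
  termination_by n
  decreasing_by omega

def calculate_score_and_alignment (s1 : String) (s2 : String) (l1 : Int) (l2 : Int)
    (startpoint : Int) : Int × String × String :=
  let alignment_s1 : String := pvDots startpoint.toNat ++ s2
  let r := (PySem.List.pyRange 0 l2 1).foldl
    (fun (st : Int × List Char) i =>
      if i + startpoint < l1 then
        if PySem.Str.pyGet? s1 (i + startpoint) = PySem.Str.pyGet? s2 i then
          (st.1 + 1, st.2 ++ ['*'])
        else (st.1, st.2 ++ ['-'])
      else st) (0, ([] : List Char))
  (r.1, alignment_s1, String.ofList r.2)

def compare_seq_score (s1 : String) (s2 : String) (l1 : Int) (l2 : Int) : Int × String × String :=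
  let r := (PySem.List.pyRange 0 l1 1).foldl
    (fun (st : Int × Option String × Option String) i =>
      let c := calculate_score_and_alignment s1 s2 l1 l2 i
      if c.1 > st.1 then (c.1, some c.2.1, some c.2.2) else st)
    (-1, none, none)
  (r.1, r.2.1.getD "", r.2.2.getD "")

-- ===== PORT B =====
-- counts[p-j] += 1  (always in range: 0 ≤ p-j < l1, see the guard and the index)
def pvBump (l : List Int) (n : Int) : List Int :=
  PySem.List.pySetD l n (PySem.List.pyGetD l n 0 + 1)

-- the index-building and counting loops of Source B (pos1 / counts); s1[p] and s2[j]
-- are ported with the total pyGetD '?' stand-in: inside Pre_ every index is in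
-- range, so this is exact (outside Pre_ the Python raises IndexError there)
def pvCounts (s1 : String) (s2 : String) (l1 : Int) (l2 : Int) : List Int :=
  let counts0 : List Int := List.replicate l1.toNat 0
  if 0 < l2 then
    let pos1 : PySem.Dict Char (List Int) :=
      (PySem.List.pyRange 0 l1 1).foldl
        (fun dd p => dd.modify (PySem.List.pyGetD s1.toList p '?') [] (· ++ [p]))
        PySem.Dict.empty
    (PySem.List.pyRange 0 (min l2 l1) 1).foldl
      (fun counts j =>
        ((pos1.getD (PySem.List.pyGetD s2.toList j '?') []).foldl
          (fun counts p => if j ≤ p then pvBump counts (p - j) else counts) counts))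
      counts0
  else counts0

def compare_seq_score_alt (s1 : String) (s2 : String) (l1 : Int) (l2 : Int) : Int × String × String :=
  let counts := pvCounts s1 s2 l1 l2
  let best_score : Int := (PySem.List.max? counts (fun x => x)).getD 0
  let best : Nat := (PySem.List.index? counts best_score).getD 0
  let matched : List Char := ((PySem.List.slice s1.toList (some (best : Int)) (some l1)).zip
      (PySem.List.slice s2.toList none (some (max l2 0)))).map
      (fun p => if p.1 = p.2 then '*' else '-')
  (best_score, String.ofList (List.replicate best '.' ++ s2.toList), String.ofList matched)

-- ===== PRECONDITION & SPEC =====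
-- Pre_ excludes exactly the inputs where A returns no value of the declared type: l1 < 1
-- (A returns (-1, None, None), None fields outside Int × String × String; B raises
-- ValueError there) and the inputs where A's indexing raises IndexError (l2 ≥ 1 with
-- l1 > len(s1) or min(l2, l1) > len(s2)); see the cite in claim.json.
def Pre_compare_seq_score (s1 : String) (s2 : String) (l1 : Int) (l2 : Int) : Prop :=
  1 ≤ l1 ∧ (1 ≤ l2 → l1 ≤ (s1.toList.length : Int) ∧ min l2 l1 ≤ (s2.toList.length : Int))
instance (s1 : String) (s2 : String) (l1 : Int) (l2 : Int) : Decidable (Pre_compare_seq_score s1 s2 l1 l2) := by unfold Pre_compare_seq_score; infer_instance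

def pvWitness_compare_seq_score : String × String × Int × Int := ("ACGT", "GT", 4, 2)

def Spec_compare_seq_score (s1 : String) (s2 : String) (l1 : Int) (l2 : Int) (out : Int × String × String) : Prop := out = compare_seq_score_alt s1 s2 l1 l2
instance (s1 : String) (s2 : String) (l1 : Int) (l2 : Int) (out : Int × String × String) : Decidable (Spec_compare_seq_score s1 s2 l1 l2 out) := by unfold Spec_compare_seq_score; infer_instance

-- ===== CLAIM (what is proved, stated in full; the proofs are below) =====
def Claim_equal_compare_seq_score : Prop := ∀ (s1 : String) (s2 : String) (l1 : Int) (l2 : Int), Dom_compare_seq_score s1 s2 l1 l2 → Pre_compare_seq_score s1 s2 l1 l2 → Spec_compare_seq_score s1 s2 l1 l2 (compare_seq_score s1 s2 l1 l2)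

-- ===== LEMMAS AND PROOFS =====

-- A's per-offset score, in closed form (proof-side helper).
def pvSliceScore (xs ys : List Char) : Int :=
  (xs.zip ys).foldl (fun acc p => acc + (if p.1 = p.2 then 1 else 0)) 0

-- Scores are nonnegative.
theorem pvSliceScore_nonneg (xs ys : List Char) : 0 ≤ pvSliceScore xs ys := by
  unfold pvSliceScore
  rw [PySem.List.foldl_add (g := fun p : Char × Char => if p.1 = p.2 then (1:Int) else 0)]
  have h : 0 ≤ ((xs.zip ys).map (fun p : Char × Char => if p.1 = p.2 then (1:Int) else 0)).sum := by
    apply List.sum_nonneg; intro x hx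
    simp only [List.mem_map] at hx
    obtain ⟨p, _, rfl⟩ := hx
    split <;> norm_num
  omega

-- find? is congruent on predicates that agree on the list's members.
theorem pv_find?_congr_mem {α : Type} (p q : α → Bool) :
    ∀ (L : List α), (∀ x ∈ L, p x = q x) → L.find? p = L.find? q := by
  intro L
  induction L with
  | nil => intro _; rfl
  | cons x t ih =>
    intro h
    rw [List.find?, List.find?, h x (by simp), ih (fun y hy => h y (by simp [hy]))]

-- The first index of a value in a mapped list locates find? on the source list.
theorem pv_find_of_index {α : Type} (f : α → Int) :
    ∀ (L : List α) (v : Int) (k : Nat), PySem.List.index? (L.map f) v = some k →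
      ∃ (hk : k < L.length), L.find? (fun i => f i == v) = some L[k] := by
  intro L
  induction L with
  | nil => intro v k h; simp [PySem.List.index?] at h
  | cons x t ih =>
    intro v k h
    rw [List.map_cons, PySem.List.index?_eq_idxOf?, List.idxOf?_cons] at h
    by_cases hx : f x = v
    · rw [if_pos (by simp [hx])] at h
      injection h with h; subst h
      exact ⟨by simp, by rw [List.find?_cons_of_pos (by simp [hx])]; simp⟩
    · rw [if_neg (by simp [hx])] at h
      rw [Option.map_eq_some_iff] at h
      obtain ⟨k', hk', rfl⟩ := h
      obtain ⟨hlt, hfind⟩ := ih v k' (by rw [PySem.List.index?_eq_idxOf?]; exact hk')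
      refine ⟨by simpa using Nat.succ_lt_succ hlt, ?_⟩
      rw [List.find?_cons_of_neg (by simp [hx])]
      simpa using hfind

-- A's best-keeping fold, characterised: the final score is the running max and the kept
-- strings are those of the first offset achieving it.
theorem pv_pick_go (F : Int → Int × String × String) :
    ∀ (L : List Int) (c : Int) (o : Option String × Option String),
      L.foldl (fun (st : Int × Option String × Option String) i =>
          let cc := F i
          if cc.1 > st.1 then (cc.1, some cc.2.1, some cc.2.2) else st) (c, o.1, o.2) =
        (if L.foldl (fun acc i => max acc (F i).1) c = c then ((c, o.1, o.2) : Int × Option String × Option String)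
         else match L.find? (fun i => (F i).1 == L.foldl (fun acc i => max acc (F i).1) c) with
           | some b => (L.foldl (fun acc i => max acc (F i).1) c, some (F b).2.1, some (F b).2.2)
           | none => (c, o.1, o.2)) := by
  intro L
  induction L with
  | nil => intro c o; simp
  | cons x t ih =>
    intro c o
    simp only [List.foldl_cons]
    by_cases hx : (F x).1 > c
    · rw [if_pos hx]
      have hmax : max c (F x).1 = (F x).1 := by omega
      rw [hmax]
      have := ih (F x).1 (some (F x).2.1, some (F x).2.2)
      simp only at this
      rw [this]
      have hle := PySem.List.le_foldl_max (t.map (fun i => (F i).1)) (F x).1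
      rw [List.foldl_map] at hle
      set M := t.foldl (fun acc i => max acc (F i).1) (F x).1 with hM
      have hMc : ¬ M = c := by omega
      rw [if_neg hMc]
      by_cases hxM : (F x).1 = M
      · rw [if_pos (by omega), List.find?_cons_of_pos (by simp [hxM])]
        simp [hxM]
      · rw [if_neg (by omega), List.find?_cons_of_neg (by simp [hxM])]
        have hmm := PySem.List.foldl_max_mem (t.map (fun i => (F i).1)) (F x).1
        rw [List.foldl_map] at hmm
        rcases hmm with hmm | hmm
        · exact absurd hmm.symm hxM
        · obtain ⟨b, hb, hfb⟩ := List.mem_map.mp hmm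
          cases hfind : List.find? (fun i => (F i).1 == M) t with
          | some b' => rfl
          | none =>
            rw [List.find?_eq_none] at hfind
            have hfbM : (F b).1 = M := hfb
            exact absurd (by simp [hfbM]) (hfind b hb)
    · rw [if_neg hx]
      have hmax : max c (F x).1 = c := by omega
      rw [hmax]
      rw [ih c o]
      set M := t.foldl (fun acc i => max acc (F i).1) c with hM
      by_cases hMc : M = c
      · rw [if_pos hMc, if_pos hMc]
      · rw [if_neg hMc, if_neg hMc]
        have hle := PySem.List.le_foldl_max (t.map (fun i => (F i).1)) c
        rw [List.foldl_map] at hle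
        have hxM : ¬ (F x).1 = M := by omega
        rw [List.find?_cons_of_neg (by simp [hxM])]

-- pvDots produces exactly n dots
theorem pvDots_toList : ∀ (n : Nat), (pvDots n).toList = List.replicate n '.' := by
  intro n
  induction n using Nat.strong_induction_on with
  | _ n ih =>
    unfold pvDots
    by_cases h : n = 0
    · simp [h]
    · rw [dif_neg h]
      by_cases h2 : n % 2 = 0
      · rw [if_pos h2, String.toList_append, ih (n / 2) (by omega), ← List.replicate_add]
        congr 1
        omega
      · rw [if_neg h2, String.toList_push, String.toList_append, ih (n / 2) (by omega),
            ← List.replicate_add, ← List.replicate_succ']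
        congr 1
        omega

-- the alignment string, in canonical form
theorem pvDots_append (n : Nat) (s : String) :
    pvDots n ++ s = String.ofList (List.replicate n '.' ++ s.toList) := by
  have h1 : (pvDots n ++ s).toList = List.replicate n '.' ++ s.toList := by
    rw [String.toList_append, pvDots_toList]
  calc pvDots n ++ s = String.ofList ((pvDots n ++ s).toList) := String.ofList_toList.symm
    _ = String.ofList (List.replicate n '.' ++ s.toList) := by rw [h1]

-- Per-offset agreement: A's inner scan equals the zipped-slice closed form.
theorem pv_calc_eq (s1 s2 : String) (l1 l2 : Int)
    (hpre : Pre_compare_seq_score s1 s2 l1 l2) (i : Int) (h0 : 0 ≤ i) (h1 : i < l1) :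
    calculate_score_and_alignment s1 s2 l1 l2 i =
      (pvSliceScore (PySem.List.slice s1.toList (some i) (some l1))
         (if 0 < l2 then PySem.List.slice s2.toList none (some l2) else []),
       String.ofList (List.replicate i.toNat '.' ++ s2.toList),
       String.ofList (((PySem.List.slice s1.toList (some i) (some l1)).zip
           (if 0 < l2 then PySem.List.slice s2.toList none (some l2) else [])).map
           (fun p => if p.1 = p.2 then '*' else '-'))) := by
  obtain ⟨hp1, himp⟩ := hpre
  set n1 := s1.toList with hn1
  set n2 := s2.toList with hn2
  have hpfx : (if 0 < l2 then PySem.List.slice n2 none (some l2) else []) = n2.take l2.toNat := by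
    by_cases hl2 : 0 < l2
    · rw [if_pos hl2, PySem.List.slice_to n2 (by omega)]
    · rw [if_neg hl2, show l2.toNat = 0 by omega, List.take_zero]
  rw [hpfx]
  have hxs : PySem.List.slice n1 (some i) (some l1) = (n1.drop i.toNat).take (l1.toNat - i.toNat) := by
    rw [PySem.List.slice_toNat n1 h0 (by omega)]
  rw [hxs]
  set xs := (n1.drop i.toNat).take (l1.toNat - i.toNat) with hxsdef
  set pfx := n2.take l2.toNat with hpfxdef
  set z := xs.zip pfx with hzdef
  have key : (PySem.List.pyRange 0 l2 1).foldl
      (fun (st : Int × List Char) j =>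
        if j + i < l1 then
          if PySem.Str.pyGet? s1 (j + i) = PySem.Str.pyGet? s2 j then
            (st.1 + 1, st.2 ++ ['*'])
          else (st.1, st.2 ++ ['-'])
        else st) (0, ([] : List Char)) =
      (pvSliceScore xs pfx, z.map (fun p => if p.1 = p.2 then '*' else '-')) := by
    by_cases hl2 : 0 < l2
    case neg =>
      rw [PySem.List.pyRange_one_eq_nil (by omega)]
      have hpe : pfx = [] := by rw [hpfxdef, show l2.toNat = 0 by omega, List.take_zero]
      rw [hzdef, hpe, List.zip_nil_right]
      simp [pvSliceScore]
    case pos =>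
    obtain ⟨hp2, hp3⟩ := himp (by omega)
    have hxslen : xs.length = l1.toNat - i.toNat := by
      rw [hxsdef, List.length_take, List.length_drop]; omega
    have hpfxlen : pfx.length = min l2.toNat n2.length := by
      rw [hpfxdef, List.length_take]
    have hzlen : z.length = min (l1.toNat - i.toNat) (min l2.toNat n2.length) := by
      rw [hzdef, List.length_zip, hxslen, hpfxlen]
    have hml2 : (z.length : Int) ≤ l2 := by
      have := hzlen; omega
    have hcongtail : ∀ (acc : Int × List Char), ∀ x ∈ PySem.List.pyRange (z.length : Int) l2,
        (fun (st : Int × List Char) j =>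
          if j + i < l1 then
            if PySem.Str.pyGet? s1 (j + i) = PySem.Str.pyGet? s2 j then
              (st.1 + 1, st.2 ++ ['*'])
            else (st.1, st.2 ++ ['-'])
          else st) acc x = (fun (st : Int × List Char) (_ : Int) => st) acc x := by
      intro acc j hj
      rw [PySem.List.mem_pyRange_one] at hj
      simp only
      rw [if_neg (by omega)]
    have htail : ∀ (init : Int × List Char),
        List.foldl (fun (st : Int × List Char) j =>
          if j + i < l1 then
            if PySem.Str.pyGet? s1 (j + i) = PySem.Str.pyGet? s2 j then
              (st.1 + 1, st.2 ++ ['*'])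
            else (st.1, st.2 ++ ['-'])
          else st) init (PySem.List.pyRange (z.length : Int) l2) = init := by
      intro init
      rw [PySem.List.foldl_congr_mem _ _ _ init hcongtail, PySem.List.foldl_ignore]
    have hconghead : ∀ (acc : Int × List Char), ∀ x ∈ PySem.List.pyRange 0 (z.length : Int),
        (fun (st : Int × List Char) j =>
          if j + i < l1 then
            if PySem.Str.pyGet? s1 (j + i) = PySem.Str.pyGet? s2 j then
              (st.1 + 1, st.2 ++ ['*'])
            else (st.1, st.2 ++ ['-'])
          else st) acc x =
        (fun (st : Int × List Char) j =>
          (fun (st : Int × List Char) (p : Char × Char) =>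
            if p.1 = p.2 then (st.1 + 1, st.2 ++ ['*']) else (st.1, st.2 ++ ['-'])) st
            (PySem.List.pyGetD z j ('?', '?'))) acc x := by
      intro acc j hj
      rw [PySem.List.mem_pyRange_one] at hj
      simp only
      have hjz : j.toNat < z.length := by omega
      have hjx : j.toNat < xs.length := by rw [hxslen]; omega
      have hjp : j.toNat < pfx.length := by
        have := List.length_zip (l₁ := xs) (l₂ := pfx); omega
      have hjn2 : j.toNat < n2.length := by omega
      have hji1 : (j + i).toNat < n1.length := by omega
      have hg1 : PySem.Str.pyGet? s1 (j + i) = some (n1[(j + i).toNat]'hji1) :=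
        PySem.List.pyGet?_eq_some_getElem n1 (by omega) (by omega)
      have hg2 : PySem.Str.pyGet? s2 j = some (n2[j.toNat]'hjn2) :=
        PySem.List.pyGet?_eq_some_getElem n2 (by omega) (by omega)
      have hgd : PySem.List.pyGetD z j ('?', '?') = z[j.toNat]'hjz :=
        PySem.List.pyGetD_eq_getElem z ('?', '?') (by omega) (by omega)
      have hz1 : (z[j.toNat]'hjz).1 = n1[(j + i).toNat]'hji1 := by
        simp only [hzdef, List.getElem_zip, hxsdef, List.getElem_take, List.getElem_drop]
        congr 1
        omega
      have hz2 : (z[j.toNat]'hjz).2 = n2[j.toNat]'hjn2 := by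
        simp only [hzdef, List.getElem_zip, hpfxdef, List.getElem_take]
      rw [if_pos (by omega), hg1, hg2, hgd, hz1, hz2]
      simp only [Option.some.injEq]
    rw [PySem.List.pyRange_one_append 0 (z.length : Int) l2 (by positivity) hml2,
        List.foldl_append, htail _,
        PySem.List.foldl_congr_mem _ _ _ _ hconghead,
        PySem.List.foldl_pyRange_zero_pyGetD' z ('?', '?')
          (fun (st : Int × List Char) (p : Char × Char) =>
            if p.1 = p.2 then (st.1 + 1, st.2 ++ ['*']) else (st.1, st.2 ++ ['-'])) (0, [])]
    have hsplit : (fun (st : Int × List Char) (p : Char × Char) =>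
        if p.1 = p.2 then (st.1 + 1, st.2 ++ ['*']) else (st.1, st.2 ++ ['-'])) =
        (fun (st : Int × List Char) (p : Char × Char) =>
          ((fun (a : Int) (q : Char × Char) => a + if q.1 = q.2 then 1 else 0) st.1 p,
           (fun (m : List Char) (q : Char × Char) => m ++ [if q.1 = q.2 then '*' else '-']) st.2 p)) := by
      funext st p
      by_cases h : p.1 = p.2 <;> simp [h]
    rw [hsplit,
        PySem.List.foldl_prod_mk (fun (a : Int) (q : Char × Char) => a + if q.1 = q.2 then 1 else 0)
          (fun (m : List Char) (q : Char × Char) => m ++ [if q.1 = q.2 then '*' else '-']) z 0 [],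
        PySem.List.foldl_append_singleton_eq_map (fun (q : Char × Char) => if q.1 = q.2 then '*' else '-') z []]
    rw [List.nil_append]
    rfl
  -- assemble
  show (_, _, _) = _
  rw [key, pvDots_append, ← hn2]

-- ---- the diagonal-counter fold computes the per-offset scores ----

-- length is preserved by the bump fold
theorem pv_len_foldl_bump : ∀ (ops : List Int) (init : List Int),
    (ops.foldl pvBump init).length = init.length := by
  intro ops
  induction ops with
  | nil => intro init; rfl
  | cons n t ih =>
    intro init
    rw [List.foldl_cons, ih]
    unfold pvBump
    rw [PySem.List.length_pySetD]

-- bumping in range: each element of the result counts the bumps that hit it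
theorem pv_getD_foldl_bump : ∀ (ops : List Int) (init : List Int) (d : Int), 0 ≤ d →
    (∀ n ∈ ops, 0 ≤ n ∧ n < (init.length : Int)) →
    PySem.List.pyGetD (ops.foldl pvBump init) d 0 =
      PySem.List.pyGetD init d 0 + (ops.count d : Int) := by
  intro ops
  induction ops with
  | nil => intro init d h0 _; simp
  | cons n t ih =>
    intro init d h0 hops
    obtain ⟨hn0, hnlen⟩ := hops n (by simp)
    rw [List.foldl_cons,
        ih (pvBump init n) d h0 (by
          intro m hm
          have := hops m (by simp [hm])
          unfold pvBump
          rw [PySem.List.length_pySetD]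
          exact this)]
    have hstep : PySem.List.pyGetD (pvBump init n) d 0 =
        PySem.List.pyGetD init d 0 + (if n = d then 1 else 0) := by
      unfold pvBump
      simp only [PySem.List.pySetD_of_nonneg _ _ hn0,
        PySem.List.pyGetD_of_nonneg (i := n) _ _ hn0,
        PySem.List.pyGetD_of_nonneg (i := d) _ _ h0]
      by_cases hnd : n = d
      · subst hnd
        rw [if_pos rfl, List.getD_eq_getElem?_getD, List.getElem?_set_self',
            List.getElem?_eq_getElem (show n.toNat < init.length by omega)]
        simp [List.getD_eq_getElem?_getD,
          List.getElem?_eq_getElem (show n.toNat < init.length by omega)]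
      · rw [if_neg hnd, List.getD_eq_getElem?_getD,
            List.getElem?_set_ne (show n.toNat ≠ d.toNat by omega),
            ← List.getD_eq_getElem?_getD]
        simp
    by_cases hnd : n = d
    · subst hnd
      rw [hstep, if_pos rfl, List.count_cons_self]
      push_cast
      omega
    · rw [hstep, if_neg hnd, List.count_cons_of_ne hnd]
      omega

-- guarded inner loop = plain bump fold over the shifted, filtered positions
theorem pv_foldl_guard_eq (j : Int) : ∀ (ps : List Int) (init : List Int),
    ps.foldl (fun c p => if j ≤ p then pvBump c (p - j) else c) init =
      ((ps.filter (fun p => j ≤ p)).map (fun p => p - j)).foldl pvBump init := by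
  intro ps
  induction ps with
  | nil => intro init; rfl
  | cons p t ih =>
    intro init
    rw [List.foldl_cons, List.filter_cons]
    by_cases hp : j ≤ p
    · rw [if_pos hp, if_pos (by simpa using hp), List.map_cons, List.foldl_cons, ih]
    · rw [if_neg hp, if_neg (by simpa using hp), ih]

-- nested fold = fold over the flattened operation list
theorem pv_foldl_foldl_flatMap {α β γ : Type} (g : β → List γ) (f : α → γ → α) :
    ∀ (L : List β) (init : α),
      L.foldl (fun a b => (g b).foldl f a) init = (L.flatMap g).foldl f init := by
  intro L
  induction L with
  | nil => intro init; rfl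
  | cons b t ih =>
    intro init
    rw [List.foldl_cons, List.flatMap_cons, List.foldl_append, ih]

-- counting in a flatMap = sum of the member counts
theorem pv_count_flatMap {β : Type} [BEq β] {γ : Type} (g : γ → List β) (x : β) :
    ∀ (L : List γ), ((L.flatMap g).count x : Int) = (L.map (fun b => (((g b).count x : Nat) : Int))).sum := by
  intro L
  induction L with
  | nil => simp
  | cons b t ih =>
    rw [List.flatMap_cons, List.count_append, List.map_cons, List.sum_cons, ← ih]
    push_cast
    ring

-- the inverted index: the positions stored under c are exactly the indices holding c
theorem pv_posList (xs : List Char) (c : Char) :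
    ((PySem.List.enumerate xs).foldl
        (fun dd (pc : Int × Char) => dd.modify pc.2 [] (· ++ [pc.1])) PySem.Dict.empty).getD c []
      = ((PySem.List.enumerate xs).filter (fun pc => pc.2 == c)).map (fun pc => pc.1) := by
  have hswap : (PySem.List.enumerate xs).foldl
      (fun dd (pc : Int × Char) => dd.modify pc.2 [] (· ++ [pc.1])) PySem.Dict.empty
    = (((PySem.List.enumerate xs).map Prod.swap).foldl
      (fun dd (q : Char × Int) => dd.modify q.1 [] (· ++ [q.2])) PySem.Dict.empty) := by
    rw [List.foldl_map]
    rfl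
  rw [hswap, PySem.Dict.getD_foldl_modify_append]
  simp only [PySem.Dict.getD_empty, List.nil_append, List.filter_map, List.map_map]
  rfl

-- each position appears at most once: counting a position in the bucket of c
theorem pv_posCount (xs : List Char) (c : Char) (p0 : Int) :
    (((((PySem.List.enumerate xs).filter (fun pc => pc.2 == c)).map (fun pc => pc.1)).count p0 : Nat) : Int)
      = if (0 ≤ p0 ∧ xs[p0.toNat]? = some c) then 1 else 0 := by
  have hnd : (((PySem.List.enumerate xs).filter (fun pc => pc.2 == c)).map (fun pc => pc.1)).Nodup := by
    have hp := (PySem.List.pairwise_lt_enumerate xs 0).filter (fun pc => pc.2 == c)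
    have hm : (((PySem.List.enumerate xs).filter (fun pc => pc.2 == c)).map
        (fun pc => pc.1)).Pairwise (· < ·) := by
      rw [List.pairwise_map]
      exact hp
    exact hm.imp (fun h => ne_of_lt h)
  by_cases hmem : p0 ∈ ((PySem.List.enumerate xs).filter (fun pc => pc.2 == c)).map (fun pc => pc.1)
  · rw [List.count_eq_one_of_mem hnd hmem]
    obtain ⟨pc, hpcf, rfl⟩ := List.mem_map.mp hmem
    obtain ⟨hpc, hc⟩ := List.mem_filter.mp hpcf
    have hc' : pc.2 = c := by simpa using hc
    obtain ⟨k, hklt, hpe⟩ := (PySem.List.mem_enumerate_iff xs 0 pc).mp hpc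
    subst hpe
    dsimp only
    rw [if_pos ⟨by omega, by
      rw [show ((0:Int) + (k:Int)).toNat = k from by omega,
          List.getElem?_eq_getElem hklt]
      exact congrArg some (by simpa using hc')⟩]
    rfl
  · have hni : ¬ (0 ≤ p0 ∧ xs[p0.toNat]? = some c) := by
      rintro ⟨h0, hsome⟩
      apply hmem
      obtain ⟨hlt, hval⟩ := List.getElem?_eq_some_iff.mp hsome
      refine List.mem_map.mpr ⟨(p0, c), List.mem_filter.mpr ⟨?_, by simp⟩, rfl⟩
      refine (PySem.List.mem_enumerate_iff xs 0 (p0, c)).mpr ⟨p0.toNat, hlt, ?_⟩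
      refine Prod.ext ?_ ?_
      · dsimp only; omega
      · dsimp only; exact hval.symm
    rw [List.count_eq_zero_of_not_mem hmem, if_neg hni]
    rfl

-- zip-score as a countP over column indices
theorem pv_zip_countP (xs : List Char) : ∀ (ys : List Char) (d : Nat),
    ((xs.drop d).zip ys).countP (fun p => p.1 == p.2)
      = (List.range ys.length).countP (fun j => xs[d + j]? == some (ys.getD j '?')) := by
  intro ys
  induction ys with
  | nil => intro d; simp
  | cons y yt ih =>
    intro d
    by_cases hd : d < xs.length
    · rw [List.drop_eq_getElem_cons hd, List.zip_cons_cons, List.countP_cons, ih (d + 1),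
          List.length_cons, List.range_succ_eq_map, List.countP_cons, List.countP_map]
      have harith : ((fun j => xs[d + j]? == some ((y :: yt).getD j '?')) ∘ Nat.succ)
          = (fun j => xs[(d + 1) + j]? == some (yt.getD j '?')) := by
        funext j
        simp only [Function.comp, List.getD_cons_succ]
        rw [show d + (j + 1) = (d + 1) + j from by omega]
      rw [harith]
      congr 1
      by_cases hxy : xs[d] = y <;>
        simp [hxy, List.getElem?_eq_getElem hd, List.getD_cons_zero]
    · have hnil : xs.drop d = [] := List.drop_eq_nil_iff.mpr (by omega)
      rw [hnil, show (([] : List Char).zip (y :: yt)) = [] from rfl, List.countP_nil]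
      symm
      apply List.countP_eq_zero.mpr
      intro a _
      have hnone : xs[d + a]? = none := List.getElem?_eq_none (by omega)
      simp [hnone]

-- the inner per-column count hits the diagonal at most once
theorem pv_inner_count (xs : List Char) (d : Nat) (j : Int) (c : Char) (hj : 0 ≤ j) :
    ((((((PySem.List.enumerate xs).foldl
        (fun dd (pc : Int × Char) => dd.modify pc.2 [] (· ++ [pc.1]))
        PySem.Dict.empty).getD c []).filter (fun p => j ≤ p)).map
      (fun p => p - j)).count (d : Int) : Int)
      = if xs[((d : Int) + j).toNat]? = some c then (1:Int) else 0 := by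
  rw [pv_posList]
  have hinj : Function.Injective (fun p : Int => p - j) := by
    intro a b h
    dsimp only at h
    omega
  have hd : ((d : Nat) : Int) = (fun p : Int => p - j) ((d : Int) + j) := by
    dsimp only
    ring
  conv_lhs => rw [hd]
  rw [List.count_map_of_injective _ _ hinj,
      List.count_filter (by simpa using (show j ≤ (d : Int) + j by omega)),
      pv_posCount]
  have h0 : (0:Int) ≤ (d : Int) + j := by omega
  simp [h0]

-- the core: the flattened bump list hits diagonal d once per matching column
theorem pv_core (xs ys : List Char) (d : Nat) :
    ((((PySem.List.enumerate ys).flatMap (fun jc =>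
        (((((PySem.List.enumerate xs).foldl (fun dd (pc : Int × Char) => dd.modify pc.2 [] (· ++ [pc.1])) PySem.Dict.empty).getD jc.2 []).filter (fun p => jc.1 ≤ p)).map (fun p => p - jc.1)))).count ((d : Nat) : Int) : Nat) : Int)
      = ((((xs.drop d).zip ys).countP (fun p => p.1 == p.2) : Nat) : Int) := by
  rw [pv_count_flatMap, pv_zip_countP]
  have hmap : (PySem.List.enumerate ys).map (fun jc =>
      (((((((PySem.List.enumerate xs).foldl (fun dd (pc : Int × Char) => dd.modify pc.2 [] (· ++ [pc.1])) PySem.Dict.empty).getD jc.2 []).filter (fun p => jc.1 ≤ p)).map (fun p => p - jc.1)).count ((d : Nat) : Int) : Nat) : Int))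
      = (PySem.List.enumerate ys).map (fun jc =>
          if xs[((d : Int) + jc.1).toNat]? = some jc.2 then (1:Int) else 0) := by
    apply List.map_congr_left
    intro jc hjc
    obtain ⟨k, hk, hpe⟩ := (PySem.List.mem_enumerate_iff ys 0 jc).mp hjc
    have hj0 : 0 ≤ jc.1 := by
      subst hpe
      dsimp only
      omega
    exact pv_inner_count xs d jc.1 jc.2 hj0
  rw [hmap]
  rw [PySem.List.enumerate_eq_map_pyRange ys '?', List.map_map, PySem.List.pyRange_one,
      List.map_map]
  have hfun : (((fun jc : Int × Char => if xs[((d : Int) + jc.1).toNat]? = some jc.2 then (1:Int) else 0)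
        ∘ (fun j : Int => (j, PySem.List.pyGetD ys j '?'))) ∘ (fun k : Nat => (0:Int) + ↑k))
      = (fun k : Nat =>
          if (fun j => xs[d + j]? == some (ys.getD j '?')) k = true then (1:Int) else 0) := by
    funext k
    simp only [Function.comp, zero_add, PySem.List.pyGetD_natCast]
    rw [show ((d : Int) + (k : Int)).toNat = d + k from by omega]
    by_cases h : xs[d + k]? = some (ys.getD k '?') <;> simp [h]
  rw [hfun, PySem.List.sum_map_ite_one_zero]
  congr 2

-- zipping against two take-prefixes that agree up to the zip's length
theorem pv_zip_take_eq {α β : Type} : ∀ (xs : List α) (ys : List β) (a b : Nat),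
    min xs.length a = min xs.length b → xs.zip (ys.take a) = xs.zip (ys.take b) := by
  intro xs
  induction xs with
  | nil => intro ys a b _; simp
  | cons x xt ih =>
    intro ys a b h
    cases ys with
    | nil => simp
    | cons y yt =>
      cases a with
      | zero =>
        cases b with
        | zero => rfl
        | succ b' =>
          exfalso
          rw [List.length_cons] at h
          omega
      | succ a' =>
        cases b with
        | zero =>
          exfalso
          rw [List.length_cons] at h
          omega
        | succ b' =>
          rw [List.take_succ_cons, List.take_succ_cons, List.zip_cons_cons, List.zip_cons_cons,
              ih yt a' b' (by rw [List.length_cons] at h; omega)]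

-- the per-offset score is a match count over the zipped slices
theorem pvSliceScore_eq_countP (xs ys : List Char) :
    pvSliceScore xs ys = (((xs.zip ys).countP (fun p => p.1 == p.2) : Nat) : Int) := by
  unfold pvSliceScore
  rw [PySem.List.foldl_add (g := fun p : Char × Char => if p.1 = p.2 then (1:Int) else 0)]
  have hf : (fun p : Char × Char => if p.1 = p.2 then (1:Int) else 0)
      = (fun p : Char × Char => if (fun q : Char × Char => q.1 == q.2) p = true then (1:Int) else 0) := by
    funext p
    by_cases h : p.1 = p.2 <;> simp [h]
  rw [hf, PySem.List.sum_map_ite_one_zero]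
  exact zero_add _

-- an element of the bump-fold over a zero array is the hit count of its diagonal
theorem pv_bumpfold_getElem (ops : List Int) (L m : Nat)
    (hm : m < (ops.foldl pvBump (List.replicate L (0:Int))).length)
    (hops : ∀ n ∈ ops, 0 ≤ n ∧ n < (L : Int)) (hmL : m < L) :
    (ops.foldl pvBump (List.replicate L (0:Int)))[m] = ((ops.count ((m : Nat) : Int) : Nat) : Int) := by
  have hg := pv_getD_foldl_bump ops (List.replicate L (0:Int)) ((m : Nat) : Int) (by omega)
    (by simpa using hops)
  rw [PySem.List.pyGetD_natCast, PySem.List.pyGetD_natCast, List.getD_replicate _ hmL,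
      List.getD_eq_getElem?_getD, List.getElem?_eq_getElem hm] at hg
  simpa using hg

-- reading inside the taken prefix reads the original list
theorem pv_getD_take {α : Type} (xs : List α) (L : Nat) (j : Int) (d : α)
    (h0 : 0 ≤ j) (hj : j < (L : Int)) :
    PySem.List.pyGetD (xs.take L) j d = PySem.List.pyGetD xs j d := by
  rw [PySem.List.pyGetD_of_nonneg _ _ h0, PySem.List.pyGetD_of_nonneg _ _ h0,
      List.getD_eq_getElem?_getD, List.getD_eq_getElem?_getD,
      List.getElem?_take_of_lt (show j.toNat < L by omega)]

-- the counts list equals the per-offset score list (under Pre_)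
theorem pv_counts_eq (s1 s2 : String) (l1 l2 : Int)
    (hpre : Pre_compare_seq_score s1 s2 l1 l2) :
    pvCounts s1 s2 l1 l2 = (PySem.List.pyRange 0 l1 1).map
      (fun i => pvSliceScore (PySem.List.slice s1.toList (some i) (some l1))
        (if 0 < l2 then PySem.List.slice s2.toList none (some l2) else [])) := by
  obtain ⟨hp1, himp⟩ := hpre
  simp only [pvCounts]
  by_cases hl2 : 0 < l2
  case neg =>
    rw [if_neg hl2]
    apply List.ext_getElem
    · rw [List.length_replicate, List.length_map, PySem.List.length_pyRange_one]
      omega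
    · intro m hm1 hm2
      rw [List.getElem_replicate, List.getElem_map]
      simp [hl2, pvSliceScore, List.zip_nil_right]
  case pos =>
    rw [if_pos hl2]
    obtain ⟨hs1len, hs2len⟩ := himp (by omega)
    -- the char -> positions index, as a fold over the enumerated prefix
    have hpos : (PySem.List.pyRange 0 l1 1).foldl
        (fun dd p => dd.modify (PySem.List.pyGetD s1.toList p '?') [] (· ++ [p]))
        PySem.Dict.empty
      = (PySem.List.enumerate (PySem.List.slice s1.toList none (some l1))).foldl
        (fun dd (pc : Int × Char) => dd.modify pc.2 [] (· ++ [pc.1])) PySem.Dict.empty := by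
      rw [PySem.List.enumerate_eq_map_pyRange (PySem.List.slice s1.toList none (some l1)) '?',
          List.foldl_map]
      have hlen1 : PySem.List.len (PySem.List.slice s1.toList none (some l1)) = l1 := by
        rw [PySem.List.slice_to _ (show (0:Int) ≤ l1 by omega)]
        simp only [PySem.List.len_eq, List.length_take]
        omega
      rw [hlen1]
      exact (PySem.List.foldl_congr_mem _ _ _ _ (fun acc j hj => by
        rw [PySem.List.mem_pyRange_one] at hj
        rw [PySem.List.slice_to _ (show (0:Int) ≤ l1 by omega),
            pv_getD_take s1.toList l1.toNat j '?' (by omega) (by omega)])).symm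
    rw [hpos]
    -- the counting loop, as a fold over the enumerated usable prefix of s2
    have houter : (PySem.List.pyRange 0 (min l2 l1) 1).foldl
        (fun counts j =>
          ((((PySem.List.enumerate (PySem.List.slice s1.toList none (some l1))).foldl
              (fun dd (pc : Int × Char) => dd.modify pc.2 [] (· ++ [pc.1]))
              PySem.Dict.empty).getD (PySem.List.pyGetD s2.toList j '?') []).foldl
            (fun counts p => if j ≤ p then pvBump counts (p - j) else counts) counts))
        (List.replicate l1.toNat 0)
      = (PySem.List.enumerate (PySem.List.slice s2.toList none (some (min l2 l1)))).foldl
        (fun counts (jc : Int × Char) =>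
          ((((PySem.List.enumerate (PySem.List.slice s1.toList none (some l1))).foldl
              (fun dd (pc : Int × Char) => dd.modify pc.2 [] (· ++ [pc.1]))
              PySem.Dict.empty).getD jc.2 []).foldl
            (fun counts p => if jc.1 ≤ p then pvBump counts (p - jc.1) else counts) counts))
        (List.replicate l1.toNat 0) := by
      rw [PySem.List.enumerate_eq_map_pyRange (PySem.List.slice s2.toList none (some (min l2 l1))) '?',
          List.foldl_map]
      have hlen2 : PySem.List.len (PySem.List.slice s2.toList none (some (min l2 l1))) = min l2 l1 := by
        rw [PySem.List.slice_to _ (show (0:Int) ≤ min l2 l1 by omega)]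
        simp only [PySem.List.len_eq, List.length_take]
        omega
      rw [hlen2]
      exact (PySem.List.foldl_congr_mem _ _ _ _ (fun acc j hj => by
        rw [PySem.List.mem_pyRange_one] at hj
        rw [PySem.List.slice_to _ (show (0:Int) ≤ min l2 l1 by omega),
            pv_getD_take s2.toList (min l2 l1).toNat j '?' (by omega) (by omega)])).symm
    rw [houter]
    have hG : ∀ (E2 : List (Int × Char)) (init : List Int),
        E2.foldl (fun (counts : List Int) (jc : Int × Char) =>
          (((PySem.List.enumerate (PySem.List.slice s1.toList none (some l1))).foldl
              (fun dd (pc : Int × Char) => dd.modify pc.2 [] (· ++ [pc.1]))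
              PySem.Dict.empty).getD jc.2 []).foldl
            (fun counts p => if jc.1 ≤ p then pvBump counts (p - jc.1) else counts) counts) init
        = (E2.flatMap (fun jc =>
            ((((PySem.List.enumerate (PySem.List.slice s1.toList none (some l1))).foldl
                (fun dd (pc : Int × Char) => dd.modify pc.2 [] (· ++ [pc.1]))
                PySem.Dict.empty).getD jc.2 []).filter (fun p => jc.1 ≤ p)).map
              (fun p => p - jc.1))).foldl pvBump init := by
      intro E2 init
      rw [← pv_foldl_foldl_flatMap]
      congr 1
      funext counts jc
      exact pv_foldl_guard_eq jc.1 _ counts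
    rw [hG]
    have hslen : (PySem.List.slice s1.toList none (some l1)).length ≤ l1.toNat := by
      rw [PySem.List.slice_to _ (show (0:Int) ≤ l1 by omega), List.length_take]
      omega
    apply List.ext_getElem
    · rw [pv_len_foldl_bump, List.length_replicate, List.length_map,
          PySem.List.length_pyRange_one]
      omega
    · intro m hm1 hm2
      have hmL : m < l1.toNat := by
        rw [pv_len_foldl_bump, List.length_replicate] at hm1
        exact hm1
      simp only [List.getElem_map, PySem.List.getElem_pyRange_one, zero_add]
      rw [pv_bumpfold_getElem _ _ m hm1 ?hops hmL]
      case hops =>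
        intro nn hn
        obtain ⟨jc, hjc, hn2⟩ := List.mem_flatMap.mp hn
        obtain ⟨p, hpf, hpn⟩ := List.mem_map.mp hn2
        obtain ⟨hpmem, hple⟩ := List.mem_filter.mp hpf
        rw [pv_posList] at hpmem
        obtain ⟨pc, hpcf, hpcp⟩ := List.mem_map.mp hpmem
        obtain ⟨hpc, _⟩ := List.mem_filter.mp hpcf
        obtain ⟨k, hkl, hpe⟩ := (PySem.List.mem_enumerate_iff _ 0 pc).mp hpc
        obtain ⟨k2, hk2l, hpe2⟩ := (PySem.List.mem_enumerate_iff _ 0 jc).mp hjc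
        subst hpe
        subst hpe2
        dsimp only at hpcp hple hpn
        simp only [decide_eq_true_eq] at hple
        omega
      rw [pv_core]
      have hX : (PySem.List.slice s1.toList none (some l1)).drop m
          = PySem.List.slice s1.toList (some ((m : Nat) : Int)) (some l1) := by
        rw [PySem.List.slice_to _ (show (0:Int) ≤ l1 by omega),
            PySem.List.slice_toNat _ (by omega) (by omega), List.drop_take]
        simp
      rw [pvSliceScore_eq_countP]
      have hXlen : (PySem.List.slice s1.toList (some ((m : Nat) : Int)) (some l1)).length
          = l1.toNat - m := by
        rw [PySem.List.slice_toNat _ (by omega) (by omega), List.length_take, List.length_drop]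
        simp only [Int.toNat_natCast]
        omega
      rw [if_pos hl2, hX,
          PySem.List.slice_to s2.toList (show (0:Int) ≤ min l2 l1 by omega),
          PySem.List.slice_to s2.toList (show (0:Int) ≤ l2 by omega),
          pv_zip_take_eq _ s2.toList (min l2 l1).toNat l2.toNat (by rw [hXlen]; omega)]

-- B's matched-string prefix agrees with the canonical prefix
theorem pv_pfx_eq (s2 : String) (l2 : Int) :
    PySem.List.slice s2.toList none (some (max l2 0)) =
      (if 0 < l2 then PySem.List.slice s2.toList none (some l2) else []) := by
  by_cases hl2 : 0 < l2
  · rw [if_pos hl2, show max l2 0 = l2 by omega]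
  · rw [if_neg hl2, show max l2 0 = 0 by omega, PySem.List.slice_to _ (by omega)]
    simp

-- ===== VERDICT (by name: the statement is the Claim_ definition above) =====
theorem compare_seq_score_spec : Claim_equal_compare_seq_score := by
  intro s1 s2 l1 l2 _ hpre
  have hp1 : 1 ≤ l1 := hpre.1
  unfold Spec_compare_seq_score
  have hF := pv_pick_go (calculate_score_and_alignment s1 s2 l1 l2)
      (PySem.List.pyRange 0 l1 1) (-1) (none, none)
  simp only at hF
  have hs1 : ∀ i ∈ PySem.List.pyRange 0 l1 1,
      (calculate_score_and_alignment s1 s2 l1 l2 i).1 =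
        pvSliceScore (PySem.List.slice s1.toList (some i) (some l1))
          (if 0 < l2 then PySem.List.slice s2.toList none (some l2) else []) := by
    intro i hi
    rw [PySem.List.mem_pyRange_one] at hi
    rw [pv_calc_eq s1 s2 l1 l2 hpre i hi.1 hi.2]
  have hmaxcong : (PySem.List.pyRange 0 l1 1).foldl
      (fun acc i => max acc (calculate_score_and_alignment s1 s2 l1 l2 i).1) (-1) =
      (PySem.List.pyRange 0 l1 1).foldl
      (fun acc i => max acc (pvSliceScore (PySem.List.slice s1.toList (some i) (some l1))
        (if 0 < l2 then PySem.List.slice s2.toList none (some l2) else []))) (-1) :=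
    PySem.List.foldl_congr_mem _ _ _ _ (fun acc i hi => by rw [hs1 i hi])
  rw [hmaxcong] at hF
  have hLcons : PySem.List.pyRange 0 l1 1 = 0 :: PySem.List.pyRange (0 + 1) l1 1 :=
    PySem.List.pyRange_one_cons (by omega)
  have hf0 : 0 ≤ pvSliceScore (PySem.List.slice s1.toList (some 0) (some l1))
      (if 0 < l2 then PySem.List.slice s2.toList none (some l2) else []) :=
    pvSliceScore_nonneg _ _
  have hMeq : (PySem.List.pyRange 0 l1 1).foldl
      (fun acc i => max acc (pvSliceScore (PySem.List.slice s1.toList (some i) (some l1))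
        (if 0 < l2 then PySem.List.slice s2.toList none (some l2) else []))) (-1) =
      ((PySem.List.pyRange (0 + 1) l1 1).map
        (fun i => pvSliceScore (PySem.List.slice s1.toList (some i) (some l1))
          (if 0 < l2 then PySem.List.slice s2.toList none (some l2) else []))).foldl max
        (pvSliceScore (PySem.List.slice s1.toList (some 0) (some l1))
          (if 0 < l2 then PySem.List.slice s2.toList none (some l2) else [])) := by
    rw [hLcons, List.foldl_cons, ← List.foldl_map]
    congr 1
    omega
  have hMge := PySem.List.le_foldl_max ((PySem.List.pyRange (0 + 1) l1 1).map
        (fun i => pvSliceScore (PySem.List.slice s1.toList (some i) (some l1))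
          (if 0 < l2 then PySem.List.slice s2.toList none (some l2) else [])))
        (pvSliceScore (PySem.List.slice s1.toList (some 0) (some l1))
          (if 0 < l2 then PySem.List.slice s2.toList none (some l2) else []))
  have hMmem : ((PySem.List.pyRange (0 + 1) l1 1).map
        (fun i => pvSliceScore (PySem.List.slice s1.toList (some i) (some l1))
          (if 0 < l2 then PySem.List.slice s2.toList none (some l2) else []))).foldl max
        (pvSliceScore (PySem.List.slice s1.toList (some 0) (some l1))
          (if 0 < l2 then PySem.List.slice s2.toList none (some l2) else [])) ∈
      (PySem.List.pyRange 0 l1 1).map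
        (fun i => pvSliceScore (PySem.List.slice s1.toList (some i) (some l1))
          (if 0 < l2 then PySem.List.slice s2.toList none (some l2) else [])) := by
    rw [hLcons, List.map_cons]
    rcases PySem.List.foldl_max_mem ((PySem.List.pyRange (0 + 1) l1 1).map
        (fun i => pvSliceScore (PySem.List.slice s1.toList (some i) (some l1))
          (if 0 < l2 then PySem.List.slice s2.toList none (some l2) else [])))
        (pvSliceScore (PySem.List.slice s1.toList (some 0) (some l1))
          (if 0 < l2 then PySem.List.slice s2.toList none (some l2) else [])) with hmm | hmm
    · rw [hmm]; exact List.mem_cons_self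
    · exact List.mem_cons_of_mem _ hmm
  obtain ⟨k, hk⟩ := Option.isSome_iff_exists.mp
    ((PySem.List.index?_isSome_iff _ _).mpr hMmem)
  obtain ⟨hklt, hfind⟩ := pv_find_of_index _ _ _ _ hk
  have hkl1 : (k : Int) < l1 := by
    have h := hklt
    rw [PySem.List.length_pyRange_one] at h
    omega
  have hLk : (PySem.List.pyRange 0 l1 1)[k]'hklt = (k : Int) := by
    rw [PySem.List.getElem_pyRange_one]
    omega
  rw [hLk] at hfind
  rw [hMeq] at hF
  rw [if_neg (by have := hMge.1; omega)] at hF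
  rw [pv_find?_congr_mem _ _ _ (fun i hi => by rw [hs1 i hi]), hfind] at hF
  simp only at hF
  simp only [compare_seq_score, compare_seq_score_alt]
  rw [pv_counts_eq s1 s2 l1 l2 hpre, pv_pfx_eq s2 l2]
  rw [hF]
  rw [hLcons, List.map_cons, PySem.List.max?_id_cons]
  simp only [Option.getD_some]
  rw [hLcons, List.map_cons] at hk
  rw [hk]
  simp only [Option.getD_some]
  rw [pv_calc_eq s1 s2 l1 l2 hpre (k : Int) (by positivity) hkl1]
  simp only [Int.toNat_natCast]
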